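-- pv_equiv track=rewrite | github.com/Skalitz001/indian-equity-platform | src/gift_nifty/repository.py | _find_first_column
-- ===== SOURCE A (Python) =====
-- def _find_first_column(columns, aliases):
--     normalized = {
--         str(column).strip().lower(): column
--         for column in columns
--     }
--
--     for alias in aliases:
--         match = normalized.get(alias.lower())
--         if match is not None:
--             return match
--
--     return None
-- ===== SOURCE B (Python) =====
-- def _find_first_column(columns, aliases):
--     rank = {}
--     for position, alias in enumerate(aliases):
--         key = alias.lower()
--         if key not in rank:
--             rank[key] = position
--     best = None
--     best_rank = len(aliases)
--     for column in columns:
--         r = rank.get(str(column).strip().lower())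
--         if r is not None and r < best_rank:
--             best = column
--             best_rank = r
--     return best
-- ===== Notes on version B (the rewrite author's own statement) =====
-- stated objective: alternative
-- what changed: B inverts A's data flow: instead of indexing the columns and looping over aliases, it indexes the lowered aliases by position (first occurrence wins) and makes a single pass over the columns keeping the column whose normalized name has the smallest alias position; Pre_ excludes inputs where two different column strings normalize to an alias's lowered name, on which A's dict-reinsertion last-wins order is accidental (B keeps the first such column).
-- outside the precondition, e.g. on _find_first_column(['A ', 'a'], ['a']): A returns 'a', B returns 'A '
import Mathlib
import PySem

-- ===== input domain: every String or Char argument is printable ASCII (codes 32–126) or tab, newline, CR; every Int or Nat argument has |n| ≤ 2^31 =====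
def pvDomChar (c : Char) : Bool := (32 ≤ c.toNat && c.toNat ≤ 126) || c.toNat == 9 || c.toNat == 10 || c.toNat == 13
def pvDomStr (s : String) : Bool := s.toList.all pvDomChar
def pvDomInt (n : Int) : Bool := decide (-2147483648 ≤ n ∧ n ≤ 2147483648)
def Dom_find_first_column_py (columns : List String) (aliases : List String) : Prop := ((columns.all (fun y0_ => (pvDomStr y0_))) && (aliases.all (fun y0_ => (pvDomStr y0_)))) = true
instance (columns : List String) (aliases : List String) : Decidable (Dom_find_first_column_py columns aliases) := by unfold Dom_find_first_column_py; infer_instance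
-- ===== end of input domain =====

-- B indexes the lowered aliases by position once and makes a single pass over the columns keeping
-- the column whose normalized name has the smallest alias position (objective: alternative).


-- str(column).strip().lower(), shared normalization
def ffcNorm (c : String) : String := PySem.Str.lower (PySem.Str.strip c)

-- ===== PORT A =====
-- the 'for alias in aliases:' loop of A, returning at the first dict hit
def ffcAliasLoopA (normalized : PySem.Dict String String) : List String → Option String
  | [] => none
  | a :: rest =>
    match normalized.get? (PySem.Str.lower a) with
    | some m => some m
    | none => ffcAliasLoopA normalized rest

def find_first_column_py (columns : List String) (aliases : List String) : Option String :=
  let normalized : PySem.Dict String String :=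
    columns.foldl (fun d column => d.insert (ffcNorm column) column) PySem.Dict.empty
  ffcAliasLoopA normalized aliases

-- ===== PORT B =====
-- B's 'for position, alias in enumerate(aliases):' loop body: first-wins position index
def ffcRankStep (d : PySem.Dict String Int) (p : Int × String) : PySem.Dict String Int :=
  let key := PySem.Str.lower p.2
  if d.contains key then d else d.insert key p.1

-- one step of B's 'for column in columns:' loop; state = (best, best_rank);
-- 'r is not None and r < best_rank' is the some-branch of the get?
def ffcStep (rank : PySem.Dict String Int) (s : Option String × Int) (column : String) : Option String × Int :=
  match rank.get? (ffcNorm column) with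
  | some r => if r < s.2 then (some column, r) else s
  | none => s

def find_first_column_py_alt (columns : List String) (aliases : List String) : Option String :=
  let rank := (PySem.List.enumerate aliases).foldl ffcRankStep PySem.Dict.empty
  (columns.foldl (ffcStep rank) (none, (aliases.length : Int))).1

-- ===== PRECONDITION & SPEC =====
-- Pre_ excludes inputs on which two DIFFERENT column strings both normalize to some alias's
-- lowered name: there A's dict-comprehension keeps the LAST such column by reinsertion overwrite,
-- an accidental tie-break, while B keeps the first; both values are equally defensible.
def Pre_find_first_column_py (columns : List String) (aliases : List String) : Prop :=
  ∀ a ∈ aliases, ∀ c ∈ columns, ∀ c' ∈ columns,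
    ffcNorm c = PySem.Str.lower a → ffcNorm c' = PySem.Str.lower a → c = c'
instance (columns : List String) (aliases : List String) : Decidable (Pre_find_first_column_py columns aliases) := by unfold Pre_find_first_column_py; infer_instance
def pvWitness_find_first_column_py : List String × List String := (["Close ", "OPEN"], ["open", "close"])
def Spec_find_first_column_py (columns : List String) (aliases : List String) (out : Option String) : Prop := out = find_first_column_py_alt columns aliases
instance (columns : List String) (aliases : List String) (out : Option String) : Decidable (Spec_find_first_column_py columns aliases out) := by unfold Spec_find_first_column_py; infer_instance

-- ===== CLAIM (what is proved, stated in full; the proofs are below) =====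
def Claim_equal_find_first_column_py : Prop := ∀ (columns : List String) (aliases : List String), Dom_find_first_column_py columns aliases → Pre_find_first_column_py columns aliases → Spec_find_first_column_py columns aliases (find_first_column_py columns aliases)

-- ===== LEMMAS AND PROOFS =====

-- A's dict looks up to the last column with the given normalized name
theorem ffc_get_eq_lastMatch (columns : List String) (k : String) :
    ∀ (d : PySem.Dict String String) (acc : Option String), d.get? k = acc →
    (columns.foldl (fun d column => d.insert (ffcNorm column) column) d).get? k
      = columns.foldl (fun found column => if ffcNorm column == k then some column else found) acc := by
  induction columns with
  | nil => intro d acc h; simpa using h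
  | cons c rest ih =>
    intro d acc h
    simp only [List.foldl_cons]
    apply ih
    rw [PySem.Dict.get?_insert]
    by_cases hk : k = ffcNorm c
    · simp [hk]
    · have : (ffcNorm c == k) = false := by
        simp; exact fun e => hk e.symm
      simp [hk, this, h]

-- a keep-last scan all of whose matches equal c returns some c from accumulator some c
theorem ffc_lastMatch_stay (k : String) (c : String) (columns : List String)
    (h : ∀ c' ∈ columns, ffcNorm c' = k → c' = c) :
    columns.foldl (fun found column => if ffcNorm column == k then some column else found) (some c) = some c := by
  induction columns with
  | nil => rfl
  | cons c' rest ih =>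
    have htail : ∀ x ∈ rest, ffcNorm x = k → x = c := fun x hx => h x (by simp [hx])
    rw [List.foldl_cons]
    by_cases hc : ffcNorm c' = k
    · rw [if_pos (beq_iff_eq.mpr hc), h c' (by simp) hc]
      exact ih htail
    · rw [if_neg (by simp [hc])]
      exact ih htail

-- when all columns matching k are equal as strings, last match = first match
theorem ffc_lastMatch_eq_find (columns : List String) (k : String)
    (h : ∀ c ∈ columns, ∀ c' ∈ columns, ffcNorm c = k → ffcNorm c' = k → c = c') :
    columns.foldl (fun found column => if ffcNorm column == k then some column else found) none
      = columns.find? (fun c => ffcNorm c == k) := by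
  induction columns with
  | nil => rfl
  | cons c rest ih =>
    by_cases hc : ffcNorm c = k
    · have hcb : (ffcNorm c == k) = true := by simp [hc]
      simp only [List.foldl_cons, List.find?_cons, hcb, if_true]
      exact ffc_lastMatch_stay k c rest
        (fun c' hc' e => h c' (by simp [hc']) c (by simp) e hc)
    · have hcb : (ffcNorm c == k) = false := by simp [hc]
      simp only [List.foldl_cons, List.find?_cons, hcb]
      exact ih (fun x hx y hy => h x (by simp [hx]) y (by simp [hy]))

-- proof-side step function: like ffcStep but reading ranks off index? of the lowered alias list
def ffcStepI (keys : List String) (s : Option String × Int) (column : String) : Option String × Int :=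
  match PySem.List.index? keys (ffcNorm column) with
  | some n => if (n : Int) < s.2 then (some column, (n : Int)) else s
  | none => s

-- the first-wins position dict built by B's first loop looks up to index? of the lowered aliases
theorem ffc_rank_get (x : String) : ∀ (als : List String) (i : Int) (d : PySem.Dict String Int),
    ((PySem.List.enumerate als i).foldl ffcRankStep d).get? x
      = if d.contains x then d.get? x
        else (PySem.List.index? (als.map PySem.Str.lower) x).map (fun n => (n : Int) + i) := by
  intro als
  induction als with
  | nil =>
    intro i d
    by_cases h : d.contains x <;>
      simp [PySem.List.enumerate_nil, h, PySem.Dict.get?_eq_none_iff_contains]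
  | cons a t ih =>
    intro i d
    rw [PySem.List.enumerate_cons, List.foldl_cons]
    show ((PySem.List.enumerate t (i + 1)).foldl ffcRankStep (ffcRankStep d (i, a))).get? x = _
    rw [ih]
    by_cases hx : x = PySem.Str.lower a
    · by_cases hda : d.contains (PySem.Str.lower a)
      · have hd' : ffcRankStep d (i, a) = d := by simp [ffcRankStep, hda]
        have hdx : d.contains x = true := hx ▸ hda
        simp [hd', hdx]
      · have hd' : ffcRankStep d (i, a) = d.insert (PySem.Str.lower a) i := by
          simp [ffcRankStep, hda]
        have hdx : d.contains x = false := by rw [hx]; exact eq_false_of_ne_true hda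
        rw [hd', hdx]
        have hc : (d.insert (PySem.Str.lower a) i).contains x = true := by
          rw [PySem.Dict.contains_insert]
          simp [hx]
        rw [if_pos hc, if_neg (by simp)]
        rw [PySem.Dict.get?_insert, if_pos hx, hx, List.map_cons,
          PySem.List.index?_cons_self]
        simp
    · have hc : (ffcRankStep d (i, a)).contains x = d.contains x := by
        unfold ffcRankStep
        by_cases hda : d.contains (PySem.Str.lower a)
        · simp [hda]
        · rw [if_neg hda, PySem.Dict.contains_insert]
          simp [hx]
      have hg : (ffcRankStep d (i, a)).get? x = d.get? x := by
        unfold ffcRankStep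
        by_cases hda : d.contains (PySem.Str.lower a)
        · simp [hda]
        · rw [if_neg hda, PySem.Dict.get?_insert, if_neg hx]
      rw [hc, hg, List.map_cons, PySem.List.index?_cons_of_ne _ (Ne.symm hx)]
      by_cases hdx : d.contains x
      · simp [hdx]
      · rw [if_neg hdx, if_neg hdx]
        cases PySem.List.index? (t.map PySem.Str.lower) x with
        | none => rfl
        | some n =>
          simp
          omega

-- hence B's column loop is the index?-driven loop
theorem ffc_step_eq_stepI (aliases : List String) :
    ffcStep ((PySem.List.enumerate aliases).foldl ffcRankStep PySem.Dict.empty)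
      = ffcStepI (aliases.map PySem.Str.lower) := by
  funext s c
  unfold ffcStep ffcStepI
  rw [ffc_rank_get (ffcNorm c) aliases 0 PySem.Dict.empty,
    if_neg (by simp [PySem.Dict.contains_empty])]
  cases PySem.List.index? (aliases.map PySem.Str.lower) (ffcNorm c) with
  | none => rfl
  | some n => simp

-- B's column loop never moves off rank 0
theorem ffc_fold_rank_zero (keys : List String) (columns : List String) :
    ∀ b, columns.foldl (ffcStepI keys) (b, 0) = (b, 0) := by
  induction columns with
  | nil => intro b; rfl
  | cons c rest ih =>
    intro b
    cases hI : PySem.List.index? keys (ffcNorm c) with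
    | none =>
      simp only [List.foldl_cons, ffcStepI, hI]
      exact ih b
    | some r =>
      simp only [List.foldl_cons, ffcStepI, hI]
      rw [if_neg (by omega)]
      exact ih b

-- shifting every rank by one commutes with B's column loop
theorem ffc_fold_shift (k : String) (rest : List String) (columns : List String)
    (h : ∀ c ∈ columns, ffcNorm c ≠ k) :
    ∀ (b : Option String) (r : Int),
      columns.foldl (ffcStepI (k :: rest)) (b, r + 1)
        = ((columns.foldl (ffcStepI rest) (b, r)).1, (columns.foldl (ffcStepI rest) (b, r)).2 + 1) := by
  induction columns with
  | nil => intro b r; rfl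
  | cons c cs ih =>
    intro b r
    have hc := h c (by simp)
    have hcons : PySem.List.index? (k :: rest) (ffcNorm c)
        = (PySem.List.index? rest (ffcNorm c)).map (· + 1) :=
      PySem.List.index?_cons_of_ne rest (Ne.symm hc)
    have htail : ∀ c' ∈ cs, ffcNorm c' ≠ k := fun c' hc' => h c' (by simp [hc'])
    cases hI : PySem.List.index? rest (ffcNorm c) with
    | none =>
      simp only [List.foldl_cons, ffcStepI, hcons, hI, Option.map_none]
      exact ih htail b r
    | some j =>
      simp only [List.foldl_cons, ffcStepI, hcons, hI, Option.map_some]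
      have hcast : ((j + 1 : Nat) : Int) = (j : Int) + 1 := by push_cast; ring
      rw [hcast]
      by_cases hj : (j : Int) < r
      · rw [if_pos (by omega), if_pos hj]
        exact ih htail (some c) j
      · rw [if_neg (by omega), if_neg hj]
        exact ih htail b r

-- if some column's normalized name is k, B's column loop (with rank ≥ 1 pending) returns the first one
theorem ffc_fold_hit (k : String) (rest : List String) :
    ∀ (columns : List String) (c0 : String), columns.find? (fun c => ffcNorm c == k) = some c0 →
    ∀ (b : Option String) (r : Int), 1 ≤ r →
      (columns.foldl (ffcStepI (k :: rest)) (b, r)).1 = some c0 := by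
  intro columns
  induction columns with
  | nil => intro c0 h; simp at h
  | cons c cs ih =>
    intro c0 h b r hr
    by_cases hc : ffcNorm c = k
    · have hcb : (ffcNorm c == k) = true := by simp [hc]
      rw [List.find?_cons, hcb] at h
      have h0 : PySem.List.index? (k :: rest) (ffcNorm c) = some 0 := by
        rw [hc]; exact PySem.List.index?_cons_self k rest
      simp only [List.foldl_cons, ffcStepI, h0]
      rw [if_pos (by omega), show ((0 : Nat) : Int) = 0 from rfl, ffc_fold_rank_zero]
      exact h
    · have hcb : (ffcNorm c == k) = false := by simp [hc]
      rw [List.find?_cons, hcb] at h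
      cases hidx : PySem.List.index? (k :: rest) (ffcNorm c) with
      | none =>
        simp only [List.foldl_cons, ffcStepI, hidx]
        exact ih c0 h b r hr
      | some j =>
        simp only [List.foldl_cons, ffcStepI, hidx]
        have hj1 : 1 ≤ j := by
          rcases (PySem.List.index?_eq_some_iff _ _ _).mp hidx with ⟨pre, suf, heq, hlen, hnm⟩
          cases pre with
          | nil => simp at heq; exact absurd heq.1.symm hc
          | cons p ps => simp at hlen; omega
        by_cases hlt : (j : Int) < r
        · rw [if_pos hlt]
          exact ih c0 h (some c) j (by omega)
        · rw [if_neg hlt]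
          exact ih c0 h b r hr

-- B's column loop agrees with "first key with a first-match find?" (no Pre_ needed)
theorem ffc_alt_char (columns : List String) :
    ∀ (keys : List String),
      (columns.foldl (ffcStepI keys) (none, (keys.length : Int))).1
        = keys.findSome? (fun k => columns.find? (fun c => ffcNorm c == k)) := by
  intro keys
  induction keys with
  | nil =>
    have : ∀ acc : Option String × Int, columns.foldl (ffcStepI []) acc = acc := by
      intro acc
      induction columns generalizing acc with
      | nil => rfl
      | cons c cs ih =>
        have hI : PySem.List.index? ([] : List String) (ffcNorm c) = none := by
          simp
        simp only [List.foldl_cons, ffcStepI, hI]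
        exact ih acc
    simp [this]
  | cons k rest ih =>
    rw [List.findSome?_cons]
    have hlen : ((k :: rest).length : Int) = (rest.length : Int) + 1 := by
      simp [List.length_cons]
    cases hf : columns.find? (fun c => ffcNorm c == k) with
    | some c0 =>
      rw [hlen]
      exact ffc_fold_hit k rest columns c0 hf none ((rest.length : Int) + 1) (by omega)
    | none =>
      have hno : ∀ c ∈ columns, ffcNorm c ≠ k := by
        intro c hc e
        have := List.find?_eq_none.mp hf c hc
        simp [e] at this
      rw [hlen, ffc_fold_shift k rest columns hno none (rest.length : Int)]
      exact ih

-- A agrees with the same characterization, given Pre_'s uniqueness of matching columns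
theorem ffc_a_char (columns : List String) (aliases : List String)
    (hpre : Pre_find_first_column_py columns aliases) :
    find_first_column_py columns aliases
      = (aliases.map PySem.Str.lower).findSome? (fun k => columns.find? (fun c => ffcNorm c == k)) := by
  unfold find_first_column_py
  induction aliases with
  | nil => rfl
  | cons a rest ih =>
    simp only [ffcAliasLoopA, List.map_cons, List.findSome?_cons]
    rw [ffc_get_eq_lastMatch columns (PySem.Str.lower a) PySem.Dict.empty none (by simp [PySem.Dict.get?_empty]),
        ffc_lastMatch_eq_find columns (PySem.Str.lower a)
          (fun c hc c' hc' => hpre a (by simp) c hc c' hc')]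
    cases columns.find? (fun c => ffcNorm c == PySem.Str.lower a) with
    | some m => rfl
    | none => exact ih (fun a' ha' => hpre a' (by simp [ha']))

-- ===== VERDICT (by name: the statement is the Claim_ definition above) =====
theorem find_first_column_py_spec : Claim_equal_find_first_column_py := by
  intro columns aliases _ hpre
  unfold Spec_find_first_column_py
  show find_first_column_py columns aliases
      = (columns.foldl (ffcStep ((PySem.List.enumerate aliases).foldl ffcRankStep PySem.Dict.empty))
          (none, (aliases.length : Int))).1
  rw [ffc_a_char columns aliases hpre, ffc_step_eq_stepI, ← ffc_alt_char]
  simp [List.length_map]
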